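-- pv_equiv track=rewrite | github.com/fabric/fabric | doc/site/bin/toc.py | _to_html_toc
-- ===== SOURCE A (Python) =====
-- def _to_html_toc(headers):
--     lines = []
--     stack = [0]
--     for lvl, anchor, headline in headers:
--         if stack[-1] < lvl:
--             lines.append('<ul>')
--             stack.append(lvl)
--         while stack[-1] > lvl:
--             stack.pop()
--             lines.append('</ul>')
--         line = '<li><a href="#%s">%s</a></li>' % (anchor, headline)
--         lines.append(line)
--     for _ in stack[1:]:
--         lines.append('</ul>')
--     out = '\n'.join(lines)
--     return out
-- ===== SOURCE B (Python) =====
-- def _to_html_toc(headers):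
--     # Recursive-descent emitter: the implicit call stack replaces A's explicit
--     # stack of open <ul> levels; each frame renders sibling <li> items and
--     # wraps recursive child blocks in <ul>...</ul>.
--     n = len(headers)
--     parts = []
--
--     def block(i, f):
--         # Emit items belonging to the frame opened at level f; return the
--         # index of the first header that closes this frame (level < f).
--         while True:
--             _lvl, anchor, headline = headers[i]
--             parts.append('<li><a href="#%s">%s</a></li>' % (anchor, headline))
--             i += 1
--             if i == n:
--                 return i
--             nxt = headers[i][0]
--             if nxt > f:
--                 parts.append('<ul>')
--                 i = block(i, nxt)
--                 parts.append('</ul>')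
--                 if i == n:
--                     return i
--                 nxt = headers[i][0]
--             if nxt < f:
--                 return i
--
--     if n:
--         if headers[0][0] > 0:
--             parts.append('<ul>')
--             i = block(0, headers[0][0])
--             parts.append('</ul>')
--         else:
--             i = 0
--         while i < n:
--             i = block(i, 0)
--     return '\n'.join(parts)
-- ===== Notes on version B (the rewrite author's own statement) =====
-- stated objective: alternative
-- what changed: A's single pass with an explicit stack of open <ul> levels is replaced by a recursive-descent emitter whose call stack holds the open frames: a frame emits sibling <li> items, recurses (wrapped in <ul>...</ul>) when the next header's level exceeds the frame level, and returns when it drops below it.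
import Mathlib
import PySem

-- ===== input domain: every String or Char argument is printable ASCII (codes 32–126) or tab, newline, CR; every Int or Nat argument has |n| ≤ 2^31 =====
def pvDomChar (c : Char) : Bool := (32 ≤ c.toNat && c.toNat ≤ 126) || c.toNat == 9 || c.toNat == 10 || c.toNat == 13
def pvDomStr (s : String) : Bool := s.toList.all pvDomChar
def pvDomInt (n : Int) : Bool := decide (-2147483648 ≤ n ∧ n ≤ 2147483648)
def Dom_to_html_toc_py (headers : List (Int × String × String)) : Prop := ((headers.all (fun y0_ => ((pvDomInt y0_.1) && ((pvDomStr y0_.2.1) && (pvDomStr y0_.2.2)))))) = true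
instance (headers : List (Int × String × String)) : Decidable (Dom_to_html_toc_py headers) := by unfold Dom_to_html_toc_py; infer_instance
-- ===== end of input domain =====

-- B replaces A's explicit stack of open <ul> levels by a recursive-descent emitter
-- (frames on the call stack); same output, same cost (objective: alternative).


-- ===== PORT A =====
-- the '%s' interpolation of '<li><a href="#%s">%s</a></li>'
def pvLi (anchor headline : String) : String :=
  "<li><a href=\"#" ++ anchor ++ "\">" ++ headline ++ "</a></li>"

-- A's `while stack[-1] > lvl: stack.pop(); lines.append('</ul>')` (stack head = top; were
-- the stack exhausted, Python's stack[-1] would raise IndexError — excluded by Pre_)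
def popWhileA (stack : List Int) (lvl : Int) (lines : List String) : List Int × List String :=
  match stack with
  | [] => ([], lines)
  | t :: rest => if t > lvl then popWhileA rest lvl (lines ++ ["</ul>"]) else (t :: rest, lines)

def to_html_toc_py (headers : List (Int × String × String)) : String :=
  let step := fun (acc : List String × List Int) (h : Int × String × String) =>
    let lvl := h.1
    let acc1 := if acc.2.headD 0 < lvl then (acc.1 ++ ["<ul>"], lvl :: acc.2) else acc
    let (stack2, lines2) := popWhileA acc1.2 lvl acc1.1
    (lines2 ++ [pvLi h.2.1 h.2.2], stack2)
  let acc := headers.foldl step ([], [0])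
  let lines := acc.1 ++ List.replicate (acc.2.length - 1) "</ul>"
  PySem.Str.join "\n" lines

-- ===== PORT B =====
-- B's recursive `block(i, f)`: emits the sibling items of the frame opened at level f,
-- returns the emitted lines and the unconsumed suffix (first header with level < f).
-- fuel (≥ list length at every call) only makes the recursion structural.
def blockB (fuel : Nat) (f : Int) (l : List (Int × String × String)) : List String × List (Int × String × String) :=
  match fuel with
  | 0 => ([], l)
  | fuel + 1 =>
    match l with
    | [] => ([], [])
    | (_, anchor, headline) :: rest =>
      let li := pvLi anchor headline
      match rest with
      | [] => ([li], [])
      | (L, _, _) :: _ =>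
        if f < L then
          let (inner, rest') := blockB fuel L rest
          let pre := li :: "<ul>" :: (inner ++ ["</ul>"])
          match rest' with
          | [] => (pre, [])
          | (L2, _, _) :: _ =>
            if L2 < f then (pre, rest')
            else
              let (more, rest'') := blockB fuel f rest'
              (pre ++ more, rest'')
        else if L < f then ([li], rest)
        else
          let (more, rest') := blockB fuel f rest
          (li :: more, rest')

-- B's top-level `while i < n: i = block(i, 0)`
def driverLoopB (fuel : Nat) (l : List (Int × String × String)) : List String :=
  match fuel, l with
  | 0, _ => []
  | _, [] => []
  | fuel + 1, l => let (o, r) := blockB l.length 0 l; o ++ driverLoopB fuel r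

def to_html_toc_py_alt (headers : List (Int × String × String)) : String :=
  match headers with
  | [] => ""
  | (L1, _, _) :: _ =>
    let parts :=
      if 0 < L1 then
        let (o, rest) := blockB headers.length L1 headers
        ("<ul>" :: o ++ ["</ul>"]) ++ driverLoopB headers.length rest
      else
        driverLoopB headers.length headers
    PySem.Str.join "\n" parts

-- ===== PRECONDITION & SPEC =====
-- Pre_ excludes exactly the inputs on which A raises IndexError: a header with a
-- negative level makes A's while loop pop the sentinel 0 and read past the stack bottom.
def Pre_to_html_toc_py (headers : List (Int × String × String)) : Prop :=
  ∀ h ∈ headers, 0 ≤ h.1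

instance (headers : List (Int × String × String)) : Decidable (Pre_to_html_toc_py headers) := by
  unfold Pre_to_html_toc_py; infer_instance

def pvWitness_to_html_toc_py : (List (Int × String × String)) :=
  [(1, "intro", "Intro"), (2, "usage", "Usage"), (1, "faq", "FAQ")]

def Spec_to_html_toc_py (headers : List (Int × String × String)) (out : String) : Prop := out = to_html_toc_py_alt headers
instance (headers : List (Int × String × String)) (out : String) : Decidable (Spec_to_html_toc_py headers out) := by unfold Spec_to_html_toc_py; infer_instance

-- ===== CLAIM (what is proved, stated in full; the proofs are below) =====
def Claim_equal_to_html_toc_py : Prop := ∀ (headers : List (Int × String × String)), Dom_to_html_toc_py headers → Pre_to_html_toc_py headers → Spec_to_html_toc_py headers (to_html_toc_py headers)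

-- ===== LEMMAS AND PROOFS =====

-- A's per-item pop phase, output-only form (stack after pops, emitted '</ul>' lines)
def popsA : List Int → Int → List Int × List String
  | [], _ => ([], [])
  | t :: rest, lvl =>
    if lvl < t then
      let (st, m) := popsA rest lvl
      (st, "</ul>" :: m)
    else (t :: rest, [])

-- A's loop, rephrased as a recursion producing the remaining output lines
def arun : List (Int × String × String) → List Int → List String
  | [], st => List.replicate (st.length - 1) "</ul>"
  | (lvl, a, h) :: t, st =>
    if st.headD 0 < lvl then
      "<ul>" :: pvLi a h :: arun t (lvl :: st)
    else
      let (st2, mids) := popsA st lvl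
      mids ++ pvLi a h :: arun t st2

-- A about to process the head of l AFTER the push/pop phase of the previous item
def acont : List (Int × String × String) → List Int → List String
  | [], st => List.replicate (st.length - 1) "</ul>"
  | (lvl, a, h) :: t, st =>
    let (st2, mids) := popsA st lvl
    mids ++ pvLi a h :: arun t st2

-- A's output after B's frame (below-stack s) returns with unconsumed suffix l
def afterFrame : List (Int × String × String) → List Int → List String
  | [], s => List.replicate s.length "</ul>"
  | l, s => "</ul>" :: acont l s

theorem popWhileA_eq (st : List Int) (lvl : Int) (lines : List String) :
    popWhileA st lvl lines = ((popsA st lvl).1, lines ++ (popsA st lvl).2) := by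
  induction st generalizing lines with
  | nil => simp [popWhileA, popsA]
  | cons t rest ih =>
    simp only [popWhileA, popsA]
    by_cases hlt : lvl < t
    · simp [hlt, ih]
    · simp [hlt]

-- A's loop body, named (identical to the lambda inside to_html_toc_py)
def stepA (acc : List String × List Int) (h : Int × String × String) : List String × List Int :=
  let lvl := h.1
  let acc1 := if acc.2.headD 0 < lvl then (acc.1 ++ ["<ul>"], lvl :: acc.2) else acc
  let (stack2, lines2) := popWhileA acc1.2 lvl acc1.1
  (lines2 ++ [pvLi h.2.1 h.2.2], stack2)

theorem foldA_eq (l : List (Int × String × String)) (lines : List String) (st : List Int) :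
    (List.foldl stepA (lines, st) l).1 ++
      List.replicate ((List.foldl stepA (lines, st) l).2.length - 1) "</ul>"
    = lines ++ arun l st := by
  induction l generalizing lines st with
  | nil => simp [arun]
  | cons h t ih =>
    obtain ⟨lvl, a, hl⟩ := h
    simp only [List.foldl_cons, arun]
    by_cases hp : st.headD 0 < lvl
    · have hnp : ¬ lvl < lvl := lt_irrefl _
      simp only [stepA, if_pos hp, popWhileA]
      simp only [show ¬ lvl > lvl from hnp, if_false]
      rw [ih]
      simp
    · simp only [stepA, if_neg hp, popWhileA_eq]
      rw [ih]
      rcases popsA st lvl with ⟨st2, mids⟩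
      simp

theorem blockB_len (fuel : Nat) (f : Int) (l : List (Int × String × String)) :
    (blockB fuel f l).2.length ≤ l.length := by
  induction fuel generalizing f l with
  | zero => simp [blockB]
  | succ fuel ih =>
    match l with
    | [] => simp [blockB]
    | (lv, a, h) :: rest =>
      simp only [blockB]
      match rest with
      | [] => simp
      | (L, b, g) :: t' =>
        by_cases h1 : f < L
        · simp only [if_pos h1]
          rcases hc : blockB fuel L ((L, b, g) :: t') with ⟨inner, rest'⟩
          have hc2 : rest'.length ≤ ((L, b, g) :: t').length := by
            have := ih L ((L, b, g) :: t'); rw [hc] at this; exact this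
          match rest' with
          | [] => simp
          | (L2, c, k) :: r2 =>
            by_cases h2 : L2 < f
            · simp only [if_pos h2]
              simp at hc2 ⊢; omega
            · simp only [if_neg h2]
              rcases hd : blockB fuel f ((L2, c, k) :: r2) with ⟨more, rest''⟩
              have hd2 : rest''.length ≤ ((L2, c, k) :: r2).length := by
                have := ih f ((L2, c, k) :: r2); rw [hd] at this; exact this
              simp at hc2 hd2 ⊢; omega
        · by_cases h2 : L < f
          · simp [if_neg h1, if_pos h2]
          · simp only [if_neg h1, if_neg h2]
            rcases hd : blockB fuel f ((L, b, g) :: t') with ⟨more, rest'⟩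
            have := ih f ((L, b, g) :: t'); rw [hd] at this
            simp at this ⊢; omega

theorem blockB_mem (fuel : Nat) (f : Int) (l : List (Int × String × String)) :
    ∀ x ∈ (blockB fuel f l).2, x ∈ l := by
  induction fuel generalizing f l with
  | zero => simp [blockB]
  | succ fuel ih =>
    match l with
    | [] => simp [blockB]
    | (lv, a, h) :: rest =>
      simp only [blockB]
      match rest with
      | [] => simp
      | (L, b, g) :: t' =>
        by_cases h1 : f < L
        · simp only [if_pos h1]
          rcases hc : blockB fuel L ((L, b, g) :: t') with ⟨inner, rest'⟩
          have hc2 : ∀ x ∈ rest', x ∈ (L, b, g) :: t' := by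
            intro x hx; have := ih L ((L, b, g) :: t') x; rw [hc] at this; exact this hx
          match rest' with
          | [] => simp
          | (L2, c, k) :: r2 =>
            by_cases h2 : L2 < f
            · simp only [if_pos h2]
              intro x hx
              exact List.mem_cons_of_mem _ (hc2 x hx)
            · simp only [if_neg h2]
              rcases hd : blockB fuel f ((L2, c, k) :: r2) with ⟨more, rest''⟩
              intro x hx
              have hx2 : x ∈ (L2, c, k) :: r2 := by
                have := ih f ((L2, c, k) :: r2) x; rw [hd] at this; exact this hx
              exact List.mem_cons_of_mem _ (hc2 x hx2)
        · by_cases h2 : L < f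
          · simp only [if_neg h1, if_pos h2]
            intro x hx; exact List.mem_cons_of_mem _ hx
          · simp only [if_neg h1, if_neg h2]
            rcases hd : blockB fuel f ((L, b, g) :: t') with ⟨more, rest'⟩
            intro x hx
            have := ih f ((L, b, g) :: t') x; rw [hd] at this
            exact List.mem_cons_of_mem _ (this hx)

theorem blockB_ret (fuel : Nat) (f : Int) (l : List (Int × String × String))
    (hf : l.length ≤ fuel) :
    ∀ g r, (blockB fuel f l).2 = g :: r → g.1 < f := by
  induction fuel generalizing f l with
  | zero =>
    have : l = [] := by cases l <;> simp_all
    subst this; simp [blockB]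
  | succ fuel ih =>
    match l with
    | [] => simp [blockB]
    | (lv, a, h) :: rest =>
      simp only [blockB]
      match rest with
      | [] => simp
      | (L, b, g') :: t' =>
        have hrest : ((L, b, g') :: t').length ≤ fuel := by simp at hf ⊢; omega
        by_cases h1 : f < L
        · simp only [if_pos h1]
          rcases hc : blockB fuel L ((L, b, g') :: t') with ⟨inner, rest'⟩
          match rest' with
          | [] => simp
          | (L2, c, k) :: r2 =>
            by_cases h2 : L2 < f
            · simp only [if_pos h2]
              intro g r hgr
              cases hgr; exact h2
            · simp only [if_neg h2]
              rcases hd : blockB fuel f ((L2, c, k) :: r2) with ⟨more, rest''⟩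
              intro g r hgr
              have hlen : ((L2, c, k) :: r2).length ≤ fuel := by
                have := blockB_len fuel L ((L, b, g') :: t'); rw [hc] at this
                simp at this hrest ⊢; omega
              have := ih f ((L2, c, k) :: r2) hlen g r
              rw [hd] at this; exact this hgr
        · by_cases h2 : L < f
          · simp only [if_neg h1, if_pos h2]
            intro g r hgr; cases hgr; exact h2
          · simp only [if_neg h1, if_neg h2]
            rcases hd : blockB fuel f ((L, b, g') :: t') with ⟨more, rest'⟩
            intro g r hgr
            have := ih f ((L, b, g') :: t') hrest g r
            rw [hd] at this; exact this hgr

-- under Pre_, the base frame (f = 0) consumes everything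
theorem blockB_base (fuel : Nat) (l : List (Int × String × String))
    (hf : l.length ≤ fuel) (hpre : ∀ h ∈ l, 0 ≤ h.1) :
    (blockB fuel 0 l).2 = [] := by
  rcases hr : (blockB fuel 0 l).2 with _ | ⟨g, r⟩
  · rfl
  · exfalso
    have hneg := blockB_ret fuel 0 l hf g r hr
    have hmem : g ∈ l := blockB_mem fuel 0 l g (by rw [hr]; exact List.mem_cons_self)
    have := hpre g hmem
    omega

-- popping one frame: a level below f pops it first
theorem acont_pop (g : Int × String × String) (r : List (Int × String × String))
    (f : Int) (s : List Int) (h2 : g.1 < f) :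
    acont (g :: r) (f :: s) = "</ul>" :: acont (g :: r) s := by
  obtain ⟨L2, c, k⟩ := g
  simp only [acont, popsA, if_pos (show L2 < f from h2)]
  rcases popsA s L2 with ⟨st2, m⟩
  simp

-- no pop: a level at or above f stays in the frame
theorem acont_stay (g : Int × String × String) (r : List (Int × String × String))
    (f : Int) (s : List Int) (h2 : f ≤ g.1) :
    acont (g :: r) (f :: s) = pvLi g.2.1 g.2.2 :: arun r (f :: s) := by
  obtain ⟨L2, c, k⟩ := g
  simp only [acont, popsA, if_neg (show ¬ L2 < f by omega)]
  rfl

-- arun with no push equals acont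
theorem arun_nopush (g : Int × String × String) (r : List (Int × String × String))
    (st : List Int) (h : ¬ st.headD 0 < g.1) :
    arun (g :: r) st = acont (g :: r) st := by
  obtain ⟨L, a, hl⟩ := g
  simp only [arun, acont, if_neg h]

theorem afterFrame_nil (s : List Int) :
    afterFrame [] s = List.replicate s.length "</ul>" := rfl

theorem afterFrame_cons (g : Int × String × String) (r : List (Int × String × String))
    (s : List Int) : afterFrame (g :: r) s = "</ul>" :: acont (g :: r) s := rfl

-- THE SIMULATION: B's frame at level f (stack below it: s) produces exactly A's lines
theorem sim (fuel : Nat) :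
    ∀ (h : Int × String × String) (t : List (Int × String × String)) (f : Int) (s : List Int),
    (h :: t).length ≤ fuel →
    pvLi h.2.1 h.2.2 :: arun t (f :: s)
      = (blockB fuel f (h :: t)).1 ++ afterFrame (blockB fuel f (h :: t)).2 s := by
  induction fuel with
  | zero => intro h t f s hf; simp at hf
  | succ fuel ih =>
    intro h t f s hf
    obtain ⟨lv, a, hl⟩ := h
    simp only [blockB]
    match t with
    | [] => simp [arun, afterFrame]
    | (L, b, g) :: t' =>
      have hlen : ((L, b, g) :: t').length ≤ fuel := by simp at hf ⊢; omega
      by_cases h1 : f < L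
      · -- child frame
        rcases hc : blockB fuel L ((L, b, g) :: t') with ⟨inner, rest'⟩
        have hchild := ih (L, b, g) t' L (f :: s) hlen
        rw [hc] at hchild
        have harun : arun ((L, b, g) :: t') (f :: s)
            = "<ul>" :: pvLi b g :: arun t' (L :: f :: s) := by
          simp only [arun, List.headD_cons]
          rw [if_pos h1]
        simp only [if_pos h1, hc]
        match rest' with
        | [] =>
          rw [harun, hchild]
          simp [afterFrame_nil, List.replicate_succ]
        | (L2, c, k) :: r2 =>
          by_cases h2 : L2 < f
          · simp only [if_pos h2]
            rw [harun, hchild, afterFrame_cons, afterFrame_cons,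
              acont_pop (L2, c, k) r2 f s h2]
            simp
          · simp only [if_neg h2]
            rcases hd : blockB fuel f ((L2, c, k) :: r2) with ⟨more, rest''⟩
            have hlen2 : ((L2, c, k) :: r2).length ≤ fuel := by
              have := blockB_len fuel L ((L, b, g) :: t'); rw [hc] at this
              simp at this hlen ⊢; omega
            have hcont := ih (L2, c, k) r2 f s hlen2
            rw [hd] at hcont
            rw [harun, hchild, afterFrame_cons,
              acont_stay (L2, c, k) r2 f s (by omega), hcont]
            simp
      · by_cases h2 : L < f
        · -- this frame closes
          simp only [if_neg h1, if_pos h2]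
          rw [afterFrame_cons]
          have : arun ((L, b, g) :: t') (f :: s) = "</ul>" :: acont ((L, b, g) :: t') s := by
            rw [arun_nopush (L, b, g) t' (f :: s) (by simp; omega)]
            exact acont_pop (L, b, g) t' f s h2
          rw [this]
          rfl
        · -- sibling at the same level
          have hLf : L = f := by omega
          simp only [if_neg h1, if_neg h2]
          rcases hd : blockB fuel f ((L, b, g) :: t') with ⟨more, rest'⟩
          have hcont := ih (L, b, g) t' f s hlen
          rw [hd] at hcont
          have : arun ((L, b, g) :: t') (f :: s) = pvLi b g :: arun t' (f :: s) := by
            rw [arun_nopush (L, b, g) t' (f :: s) (by simp; omega)]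
            exact acont_stay (L, b, g) t' f s (by omega)
          rw [this, hcont]
          simp

-- the driver's tail: under Pre_ one blockB 0 pass consumes the whole suffix
theorem driver_tail (fuel : Nat) (l : List (Int × String × String))
    (hf : 1 ≤ fuel) (hpre : ∀ h ∈ l, 0 ≤ h.1) :
    afterFrame l [(0 : Int)] = "</ul>" :: driverLoopB fuel l := by
  match fuel, l with
  | fuel + 1, [] => simp [afterFrame_nil, driverLoopB]
  | fuel + 1, (L2, c, k) :: r =>
    rw [afterFrame_cons,
      show driverLoopB (fuel + 1) ((L2, c, k) :: r)
        = (let p := blockB ((L2, c, k) :: r).length 0 ((L2, c, k) :: r)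
           p.1 ++ driverLoopB fuel p.2) from rfl]
    rcases hd : blockB ((L2, c, k) :: r).length 0 ((L2, c, k) :: r) with ⟨o2, rest2⟩
    have hrest2 : rest2 = [] := by
      have := blockB_base ((L2, c, k) :: r).length ((L2, c, k) :: r) le_rfl hpre
      rw [hd] at this; exact this
    subst hrest2
    have hsim := sim ((L2, c, k) :: r).length (L2, c, k) r 0 [] le_rfl
    rw [hd] at hsim
    have hL2 : (0 : Int) ≤ L2 := hpre (L2, c, k) List.mem_cons_self
    have hstay : acont ((L2, c, k) :: r) [(0 : Int)]
        = pvLi c k :: arun r [(0 : Int)] := acont_stay (L2, c, k) r 0 [] hL2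
    rw [hstay]
    have h2 : pvLi c k :: arun r ([(0 : Int)]) = o2 ++ afterFrame [] ([] : List Int) := hsim
    simp only [afterFrame_nil] at h2
    rw [h2]
    cases fuel <;> simp [driverLoopB]

-- A's port, rewritten through arun
theorem toA_join (headers : List (Int × String × String)) :
    to_html_toc_py headers = PySem.Str.join "\n" (arun headers [0]) := by
  have h : to_html_toc_py headers = PySem.Str.join "\n"
      ((List.foldl stepA ([], [0]) headers).1 ++
        List.replicate ((List.foldl stepA ([], [0]) headers).2.length - 1) "</ul>") := rfl
  rw [h, foldA_eq, List.nil_append]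

-- ===== VERDICT (by name: the statement is the Claim_ definition above) =====
theorem to_html_toc_py_spec : Claim_equal_to_html_toc_py := by
  intro headers _dom hpre
  unfold Spec_to_html_toc_py
  rw [toA_join]
  unfold to_html_toc_py_alt
  match headers with
  | [] => simp [arun]; rfl
  | (L1, a1, h1) :: t =>
    have hL1 : (0 : Int) ≤ L1 := hpre (L1, a1, h1) List.mem_cons_self
    by_cases hpos : 0 < L1
    · simp only [if_pos hpos]
      rcases hb : blockB ((L1, a1, h1) :: t).length L1 ((L1, a1, h1) :: t) with ⟨o, rest⟩
      have harun : arun ((L1, a1, h1) :: t) [0]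
          = "<ul>" :: pvLi a1 h1 :: arun t (L1 :: [0]) := by
        simp only [arun, List.headD_cons]
        rw [if_pos hpos]
      have hsim := sim ((L1, a1, h1) :: t).length (L1, a1, h1) t L1 [0] le_rfl
      rw [hb] at hsim
      have hpre2 : ∀ h ∈ rest, (0 : Int) ≤ h.1 := by
        intro x hx
        have : x ∈ (L1, a1, h1) :: t := by
          have := blockB_mem ((L1, a1, h1) :: t).length L1 ((L1, a1, h1) :: t) x
          rw [hb] at this; exact this hx
        exact hpre x this
      have hdrv := driver_tail ((L1, a1, h1) :: t).length rest (by simp) hpre2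
      rw [harun, hsim, hdrv]
      simp
    · have hL10 : L1 = 0 := by omega
      subst hL10
      simp only [if_neg hpos]
      have harun : arun ((0, a1, h1) :: t) [0] = pvLi a1 h1 :: arun t [0] := by
        rw [arun_nopush (0, a1, h1) t [0] (by simp)]
        exact acont_stay (0, a1, h1) t 0 [] le_rfl
      rcases hn : ((0, a1, h1) :: t).length with _ | m
      · simp at hn
      · simp only [driverLoopB]
        rcases hd : blockB ((0, a1, h1) :: t).length 0 ((0, a1, h1) :: t) with ⟨o, rest⟩
        have hrest : rest = [] := by
          have := blockB_base ((0, a1, h1) :: t).length ((0, a1, h1) :: t) le_rfl hpre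
          rw [hd] at this; exact this
        subst hrest
        have hsim := sim ((0, a1, h1) :: t).length (0, a1, h1) t 0 [] le_rfl
        rw [hd] at hsim
        simp only [afterFrame] at hsim
        rw [harun, hsim]
        cases m <;> simp [driverLoopB]
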